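-- pv_equiv track=rewrite | github.com/ninomarlou/project-euler | 56-powerful-digit-sum.py | powerful_digit_sum
-- ===== SOURCE A (Python) =====
-- def powerful_digit_sum(limit):
--     result = 0
--     for a in range(1, limit + 1, 1):
--         for b in range(1, limit + 1, 1):
--             digital_sum = calculate_digital_sum(a**b)
--             if digital_sum > result:
--                 result = digital_sum
--
--     return result
--
-- def calculate_digital_sum(n):
--     return sum([int(digit) for digit in str(n)])
-- ===== SOURCE B (Python) =====
-- def powerful_digit_sum(limit):
--     # Works entirely on little-endian base-10 digit lists: each power a**b is
--     # maintained as a digit vector updated by schoolbook multiply-by-a with carry,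
--     # and the digit sum is just sum(digits). No big-int pow, no str conversion.
--     best = 0
--     for a in range(1, limit + 1):
--         digits = [1]
--         for _ in range(limit):
--             carry = 0
--             out = []
--             for d in digits:
--                 t = d * a + carry
--                 out.append(t % 10)
--                 carry = t // 10
--             while carry > 0:
--                 out.append(carry % 10)
--                 carry //= 10
--             digits = out
--             s = sum(digits)
--             if s > best:
--                 best = s
--     return best
-- ===== Notes on version B (the rewrite author's own statement) =====
-- stated objective: alternative
-- what changed: B abandons big-int exponentiation and string conversion entirely: each power a**b is represented as a little-endian base-10 digit list maintained by schoolbook multiply-by-a with carry propagation, and the digit sum is simply the sum of that list.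
import Mathlib
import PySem

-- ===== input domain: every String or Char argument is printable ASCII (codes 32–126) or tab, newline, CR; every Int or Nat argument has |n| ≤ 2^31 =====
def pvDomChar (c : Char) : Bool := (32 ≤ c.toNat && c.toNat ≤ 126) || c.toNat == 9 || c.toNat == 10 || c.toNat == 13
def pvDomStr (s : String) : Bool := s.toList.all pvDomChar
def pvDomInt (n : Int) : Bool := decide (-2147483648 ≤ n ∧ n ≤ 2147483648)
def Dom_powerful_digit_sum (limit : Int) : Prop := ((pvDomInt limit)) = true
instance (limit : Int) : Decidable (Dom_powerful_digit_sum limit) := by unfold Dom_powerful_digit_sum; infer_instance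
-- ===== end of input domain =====

-- B replaces A's big-int exponentiation + string digit sum by base-10 digit-vector
-- arithmetic: each power a^b is kept as a little-endian digit list updated by
-- schoolbook multiply-by-a with carry, and the digit sum is the sum of that list.

-- ===== PORT A =====
-- sum([int(digit) for digit in str(n)]); here n = a**b ≥ 1 always, so every char is a
-- decimal digit and int(digit) never raises (the .getD 0 branch is unreachable on A's calls)
def calculate_digital_sum (n : Int) : Int :=
  (((PySem.Int.toStr n).toList).map (fun c => (PySem.Int.ofChars? [c]).getD 0)).sum

def powerful_digit_sum (limit : Int) : Int :=
  (PySem.List.pyRange 1 (limit + 1) 1).foldl (fun result a =>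
    (PySem.List.pyRange 1 (limit + 1) 1).foldl (fun result b =>
      let digital_sum := calculate_digital_sum (a ^ b.toNat)
      if digital_sum > result then digital_sum else result) result) 0

-- ===== PORT B =====
-- 'while carry > 0: out.append(carry % 10); carry //= 10'
def pvCarryExpand (c : Int) : List Int :=
  if 0 < c then PySem.Int.mod c 10 :: pvCarryExpand (PySem.Int.floordiv c 10) else []
termination_by c.toNat
decreasing_by
  have h : PySem.Int.floordiv c 10 = c / 10 := by
    rw [PySem.Int.floordiv]; simp [Int.fdiv_eq_ediv]
  rw [h]; omega

-- 'for d in digits: t = d*a + carry; out.append(t % 10); carry = t // 10' then carry expansion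
def pvMulGo (a : Int) : List Int → Int → List Int
  | [], c => pvCarryExpand c
  | d :: ds, c =>
      PySem.Int.mod (d * a + c) 10 :: pvMulGo a ds (PySem.Int.floordiv (d * a + c) 10)

def powerful_digit_sum_alt (limit : Int) : Int :=
  (PySem.List.pyRange 1 (limit + 1) 1).foldl (fun best a =>
    ((PySem.List.pyRange 0 limit 1).foldl (fun (st : List Int × Int) _ =>
      let digits := pvMulGo a st.1 0
      let s := digits.sum
      (digits, if s > st.2 then s else st.2)) ([1], best)).2) 0

-- ===== PRECONDITION & SPEC =====
def Spec_powerful_digit_sum (limit : Int) (out : Int) : Prop := out = powerful_digit_sum_alt limit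
instance (limit : Int) (out : Int) : Decidable (Spec_powerful_digit_sum limit out) := by unfold Spec_powerful_digit_sum; infer_instance

-- ===== CLAIM (what is proved, stated in full; the proofs are below) =====
def Claim_equal_powerful_digit_sum : Prop := ∀ (limit : Int), Dom_powerful_digit_sum limit → Spec_powerful_digit_sum limit (powerful_digit_sum limit)

-- ===== LEMMAS AND PROOFS =====

-- proof-side reference digit sum
def pvNatDigitSum (n : Nat) : Int :=
  if n = 0 then 0 else (↑(n % 10) : Int) + pvNatDigitSum (n / 10)
decreasing_by exact Nat.div_lt_self (Nat.pos_of_ne_zero (by assumption)) (by norm_num)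

theorem pv_digitChar_val (d : Nat) (h : d < 10) :
    (PySem.Int.ofChars? [Nat.digitChar d]).getD 0 = (d : Int) := by
  interval_cases d <;> decide

theorem pv_charSum_toDigitsCore (f : Nat) : ∀ (n : Nat) (acc : List Char), n < f →
    ((Nat.toDigitsCore 10 f n acc).map (fun c => (PySem.Int.ofChars? [c]).getD 0)).sum
      = pvNatDigitSum n + ((acc.map (fun c => (PySem.Int.ofChars? [c]).getD 0)).sum) := by
  induction f with
  | zero => intro n acc h; omega
  | succ f ih =>
    intro n acc h
    rw [Nat.toDigitsCore]
    by_cases h10 : n / 10 = 0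
    · simp only [h10, if_true, List.map_cons, List.sum_cons,
        pv_digitChar_val (n % 10) (Nat.mod_lt _ (by norm_num))]
      rw [pvNatDigitSum]
      by_cases hn : n = 0
      · simp [hn]
      · rw [if_neg hn, pvNatDigitSum, if_pos h10]
        push_cast; ring
    · have hnz : n ≠ 0 := by intro h0; rw [h0] at h10; exact h10 rfl
      have hlt : n / 10 < n := Nat.div_lt_self (Nat.pos_of_ne_zero hnz) (by norm_num)
      rw [if_neg h10]
      rw [ih (n / 10) _ (by omega)]
      simp only [List.map_cons, List.sum_cons,
        pv_digitChar_val (n % 10) (Nat.mod_lt _ (by norm_num))]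
      conv_rhs => rw [pvNatDigitSum, if_neg hnz]
      push_cast; ring

theorem pv_calc_eq_natDigitSum (n : Nat) :
    calculate_digital_sum (n : Int) = pvNatDigitSum n := by
  unfold calculate_digital_sum
  rw [PySem.Int.toStr]
  rw [String.toList_ofList]
  have hneg : ¬ ((n : Int) < 0) := Int.not_lt.mpr (Int.natCast_nonneg n)
  rw [PySem.Int.toChars, if_neg hneg]
  have : ((n : Int)).toNat = n := Int.toNat_natCast n
  rw [this, Nat.toDigits, pv_charSum_toDigitsCore (n + 1) n [] (Nat.lt_succ_self n)]
  simp

-- value represented by a little-endian digit list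
def pvVal (l : List Int) : Int := l.foldr (fun d v => d + 10 * v) 0

-- all entries are decimal digits
def pvGood (l : List Int) : Prop := ∀ d ∈ l, 0 ≤ d ∧ d < 10

theorem pv_val_nonneg (l : List Int) (h : pvGood l) : 0 ≤ pvVal l := by
  induction l with
  | nil => simp [pvVal]
  | cons d ds ih =>
    have hd := h d (List.mem_cons_self)
    have hds : pvGood ds := fun x hx => h x (List.mem_cons_of_mem _ hx)
    have := ih hds
    simp only [pvVal, List.foldr_cons] at *
    omega

theorem pv_floordiv10 (t : Int) :
    PySem.Int.floordiv t 10 = t / 10 := by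
  rw [PySem.Int.floordiv]; simp [Int.fdiv_eq_ediv]

theorem pv_mod10 (t : Int) : PySem.Int.mod t 10 = t % 10 := by
  rw [PySem.Int.mod]; simp [Int.fmod_eq_emod]

theorem pv_mod10_nonneg (t : Int) (_ht : 0 ≤ t) :
    0 ≤ PySem.Int.mod t 10 ∧ PySem.Int.mod t 10 < 10 := by
  rw [pv_mod10]
  constructor
  · exact Int.emod_nonneg t (by norm_num)
  · exact Int.emod_lt_of_pos t (by norm_num)

theorem pv_carryExpand_spec (c : Int) (hc : 0 ≤ c) :
    pvGood (pvCarryExpand c) ∧ pvVal (pvCarryExpand c) = c := by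
  generalize hm : c.toNat = m
  induction m using Nat.strong_induction_on generalizing c with
  | _ m ih =>
    rw [pvCarryExpand]
    by_cases hpos : 0 < c
    · rw [if_pos hpos]
      have hdiv : PySem.Int.floordiv c 10 = c / 10 := pv_floordiv10 c
      have hdnn : 0 ≤ c / 10 := Int.ediv_nonneg hc (by norm_num)
      have hlt : (c / 10).toNat < m := by omega
      obtain ⟨hg, hv⟩ := ih (c / 10).toNat hlt (c / 10) hdnn rfl
      rw [hdiv]
      refine ⟨?_, ?_⟩
      · intro d hd
        rcases List.mem_cons.mp hd with h | h
        · subst h; exact pv_mod10_nonneg c hc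
        · exact hg d h
      · simp only [pvVal, List.foldr_cons] at *
        rw [hv, pv_mod10]
        omega
    · rw [if_neg hpos]
      refine ⟨fun d hd => absurd hd (List.not_mem_nil), ?_⟩
      simp only [pvVal, List.foldr_nil]
      omega

theorem pv_mulGo_spec (a : Int) (ha : 0 ≤ a) : ∀ (l : List Int) (c : Int),
    pvGood l → 0 ≤ c →
    pvGood (pvMulGo a l c) ∧ pvVal (pvMulGo a l c) = pvVal l * a + c := by
  intro l
  induction l with
  | nil =>
    intro c _ hc
    obtain ⟨hg, hv⟩ := pv_carryExpand_spec c hc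
    simp only [pvMulGo]
    exact ⟨hg, by simp [pvVal] at *; omega⟩
  | cons d ds ih =>
    intro c hgood hc
    have hd := hgood d (List.mem_cons_self)
    have hds : pvGood ds := fun x hx => hgood x (List.mem_cons_of_mem _ hx)
    have ht : 0 ≤ d * a + c := by nlinarith [hd.1, hd.2, ha, hc]
    have hdivnn : 0 ≤ (d * a + c) / 10 := Int.ediv_nonneg ht (by norm_num)
    simp only [pvMulGo]
    rw [pv_floordiv10]
    obtain ⟨hg, hv⟩ := ih ((d * a + c) / 10) hds hdivnn
    refine ⟨?_, ?_⟩
    · intro x hx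
      rcases List.mem_cons.mp hx with h | h
      · subst h; exact pv_mod10_nonneg _ ht
      · exact hg x h
    · simp only [pvVal, List.foldr_cons] at *
      rw [hv, pv_mod10]
      have hsplit : (d * a + c) % 10 + 10 * ((d * a + c) / 10) = d * a + c := by omega
      nlinarith [hsplit]

theorem pv_digitSum_add (dn vn : Nat) (h : dn < 10) :
    pvNatDigitSum (dn + 10 * vn) = (dn : Int) + pvNatDigitSum vn := by
  by_cases h0 : dn + 10 * vn = 0
  · have hd0 : dn = 0 := by omega
    have hv0 : vn = 0 := by omega
    subst hd0; subst hv0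
    simp [pvNatDigitSum]
  · rw [pvNatDigitSum, if_neg h0]
    have h1 : (dn + 10 * vn) % 10 = dn := by omega
    have h2 : (dn + 10 * vn) / 10 = vn := by omega
    rw [h1, h2]

theorem pv_sum_good (l : List Int) (h : pvGood l) :
    l.sum = pvNatDigitSum (pvVal l).toNat := by
  induction l with
  | nil => simp [pvVal, pvNatDigitSum]
  | cons d ds ih =>
    have hd := h d (List.mem_cons_self)
    have hds : pvGood ds := fun x hx => h x (List.mem_cons_of_mem _ hx)
    have hvnn := pv_val_nonneg ds hds
    have hval : pvVal (d :: ds) = d + 10 * pvVal ds := by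
      simp [pvVal]
    have htn : (pvVal (d :: ds)).toNat = d.toNat + 10 * (pvVal ds).toNat := by
      rw [hval]; omega
    rw [List.sum_cons, ih hds, htn,
      pv_digitSum_add d.toNat (pvVal ds).toNat (by omega)]
    omega

-- fst of B's inner fold: digits stay good and represent the running power
theorem pv_fold_fst (a : Int) (ha : 0 ≤ a) : ∀ (l : List Int) (p : List Int) (r : Int),
    pvGood p →
    pvGood ((l.foldl (fun (st : List Int × Int) _ =>
      let digits := pvMulGo a st.1 0
      let s := digits.sum
      (digits, if s > st.2 then s else st.2)) (p, r)).1) ∧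
    pvVal ((l.foldl (fun (st : List Int × Int) _ =>
      let digits := pvMulGo a st.1 0
      let s := digits.sum
      (digits, if s > st.2 then s else st.2)) (p, r)).1) = pvVal p * a ^ l.length := by
  intro l
  induction l with
  | nil =>
    intro p r hp
    simp only [List.foldl_nil, List.length_nil, pow_zero, mul_one]
    exact ⟨hp, trivial⟩
  | cons x xs ih =>
    intro p r hp
    obtain ⟨hg, hv⟩ := pv_mulGo_spec a ha p 0 hp (le_refl 0)
    simp only [List.foldl_cons, List.length_cons]
    obtain ⟨hg2, hv2⟩ := ih (pvMulGo a p 0) (if (pvMulGo a p 0).sum > r then (pvMulGo a p 0).sum else r) hg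
    refine ⟨hg2, ?_⟩
    rw [hv2, hv]
    ring

theorem pv_inner_eq (a : Int) (ha : 1 ≤ a) (k : Nat) : ∀ (r : Int),
    (PySem.List.pyRange 1 ((k : Int) + 1) 1).foldl (fun result b =>
      let digital_sum := calculate_digital_sum (a ^ b.toNat)
      if digital_sum > result then digital_sum else result) r
    = ((PySem.List.pyRange 0 (k : Int) 1).foldl (fun (st : List Int × Int) _ =>
      let digits := pvMulGo a st.1 0
      let s := digits.sum
      (digits, if s > st.2 then s else st.2)) ([1], r)).2 := by
  have hone : pvGood [1] := by intro d hd; simp at hd; omega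
  induction k with
  | zero =>
    intro r
    simp only [Nat.cast_zero]
    rw [PySem.List.pyRange_one_eq_nil (by norm_num), PySem.List.pyRange_one_eq_nil (le_refl 0)]
    rfl
  | succ k ih =>
    intro r
    have h1 : ((k : Int) + 1) + 1 = (((k : Nat) + 1 : Nat) : Int) + 1 := by push_cast; ring
    have hA : PySem.List.pyRange 1 ((((k : Nat) + 1 : Nat) : Int) + 1) 1
        = PySem.List.pyRange 1 ((k : Int) + 1) 1 ++ [(k : Int) + 1] := by
      rw [← h1]
      exact PySem.List.pyRange_one_succ_right (by omega)
    have hB : PySem.List.pyRange 0 (((k : Nat) + 1 : Nat) : Int) 1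
        = PySem.List.pyRange 0 (k : Int) 1 ++ [(k : Int)] := by
      have : (((k : Nat) + 1 : Nat) : Int) = (k : Int) + 1 := by push_cast; ring
      rw [this]
      exact PySem.List.pyRange_one_succ_right (by omega)
    rw [hA, hB, List.foldl_append, List.foldl_append, ih r]
    set st := (PySem.List.pyRange 0 (k : Int) 1).foldl (fun (st : List Int × Int) _ =>
      let digits := pvMulGo a st.1 0
      let s := digits.sum
      (digits, if s > st.2 then s else st.2)) ([1], r) with hst
    obtain ⟨hgst, hvst⟩ := pv_fold_fst a (by omega) (PySem.List.pyRange 0 (k : Int) 1) [1] r hone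
    rw [← hst] at hgst hvst
    have hlen : (PySem.List.pyRange 0 (k : Int) 1).length = k := by
      rw [PySem.List.length_pyRange_one]; omega
    rw [hlen] at hvst
    have hv1 : pvVal [1] = 1 := by simp [pvVal]
    rw [hv1, one_mul] at hvst
    obtain ⟨hgnew, hvnew⟩ := pv_mulGo_spec a (by omega) st.1 0 hgst (le_refl 0)
    have htn : ((k : Int) + 1).toNat = k + 1 := by omega
    simp only [List.foldl_cons, List.foldl_nil, htn]
    have hvpow : pvVal (pvMulGo a st.1 0) = a ^ (k + 1) := by
      rw [hvnew, hvst]; ring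
    have hcast : a ^ (k + 1) = (((a ^ (k + 1)).toNat : Nat) : Int) := by
      have : (0:Int) ≤ a ^ (k + 1) := by positivity
      omega
    have hcalc : calculate_digital_sum (a ^ (k + 1)) = (pvMulGo a st.1 0).sum := by
      rw [pv_sum_good _ hgnew, hvpow, hcast, pv_calc_eq_natDigitSum]
      rw [Int.toNat_natCast]
    rw [hcalc]

-- ===== VERDICT (by name: the statement is the Claim_ definition above) =====
theorem powerful_digit_sum_spec : Claim_equal_powerful_digit_sum := by
  intro limit _
  unfold Spec_powerful_digit_sum powerful_digit_sum powerful_digit_sum_alt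
  apply PySem.List.foldl_congr_mem
  intro acc a hmem
  rw [PySem.List.mem_pyRange_one] at hmem
  obtain ⟨ha1, ha2⟩ := hmem
  have hk : limit = ((limit.toNat : Nat) : Int) := by omega
  rw [hk]
  exact pv_inner_eq a ha1 limit.toNat acc
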